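-- pv_equiv track=rewrite | github.com/GabbaTK/battle-ship | globalVars.py | ssNoShipClose
-- ===== SOURCE A (Python) =====
-- def ssNoShipClose(board, org, lenght, rotation):
--     if rotation == "h":
--         shipInRange = False
--         for y in range(org[0] - 1, org[0] + 2):
--             if shipInRange:
--                 return not shipInRange
--
--             for x in range(org[1] - 1, org[1] + lenght + 1):
--
--                 if -1 < x < 10 and -1 < y < 10:
--                     if board[y][x] == "+":
--                         shipInRange = True
--                         break
--
--         return not shipInRange
--
--     elif rotation == "v":
--         shipInRange = False
--         for y in range(org[0] - 1, org[0] + lenght + 1):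
--             if shipInRange:
--                 return not shipInRange
--
--             for x in range(org[1] - 1, org[1] + 2):
--
--                 if -1 < x < 10 and -1 < y < 10:
--                     if board[y][x] == "+":
--                         shipInRange = True
--                         break
--
--         return not shipInRange
-- ===== SOURCE B (Python) =====
-- def ssNoShipClose(board, org, lenght, rotation):
--     if rotation == "h":
--         cells = [(org[0], org[1] + i) for i in range(lenght)]
--     elif rotation == "v":
--         cells = [(org[0] + i, org[1]) for i in range(lenght)]
--     else:
--         return None
--     offsets = [(-1, -1), (-1, 0), (-1, 1),
--                (0, -1), (0, 0), (0, 1),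
--                (1, -1), (1, 0), (1, 1)]
--
--     def plus(y, x):
--         return (0 <= y < min(10, len(board))
--                 and 0 <= x < min(10, len(board[y]))
--                 and board[y][x] == "+")
--
--     return not any(plus(y + dy, x + dx)
--                    for (y, x) in cells for (dy, dx) in offsets)
-- ===== Notes on version B (the rewrite author's own statement) =====
-- stated objective: alternative
-- what changed: A sweeps the surrounding band rectangle row by row with a flag and break; B first computes the ship's occupied cells from org/lenght/rotation and then tests the 3x3 neighborhood of each ship cell via an offset list with any(), bounds-checked against the actual board dimensions, traversing placement cells instead of band rows.
-- intended difference: On degenerate non-positive lenght (the ship occupies no cell) with rotation 'h' or 'v', a two-entry org and a '+' inside A's residual 3-row band around the origin, A still sweeps that phantom band and returns False, while B returns True because an empty ship borders nothing, which is the intended reading of 'no ship close to the placement'. — e.g. on ssNoShipClose([["+", "~"], ["~", "~"]], [0, 1], 0, "h"): A returns some false, B returns some true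
import Mathlib
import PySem

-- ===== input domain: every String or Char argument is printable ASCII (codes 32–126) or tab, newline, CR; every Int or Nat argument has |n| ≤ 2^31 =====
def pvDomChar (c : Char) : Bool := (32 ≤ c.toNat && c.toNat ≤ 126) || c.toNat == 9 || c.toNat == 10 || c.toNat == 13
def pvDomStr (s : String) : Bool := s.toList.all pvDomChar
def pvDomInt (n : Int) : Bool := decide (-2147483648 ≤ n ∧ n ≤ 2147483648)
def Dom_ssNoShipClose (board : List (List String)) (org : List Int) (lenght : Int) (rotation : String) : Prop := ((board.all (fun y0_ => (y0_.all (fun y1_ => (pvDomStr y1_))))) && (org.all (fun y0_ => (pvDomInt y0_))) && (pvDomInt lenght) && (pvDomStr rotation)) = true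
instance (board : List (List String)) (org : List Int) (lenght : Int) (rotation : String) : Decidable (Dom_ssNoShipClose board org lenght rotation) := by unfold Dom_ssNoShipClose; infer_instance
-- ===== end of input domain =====

-- B replaces A's row-by-row sweep of the surrounding band with a per-ship-cell 3x3-neighborhood
-- check over an offset list, guarded by the actual board dimensions (same cost, different
-- decomposition); on lenght ≤ 0 (empty ship) B intentionally returns true where A may find a '+'
-- in its residual band (see D_ below).

-- board[y][x] under the guard -1 < y,x < 10; on admitted inputs where Python A consults a cell it
-- exists, so the "" default is never what Python A read (Python raises exactly outside Pre_).
def pvCell (board : List (List String)) (y x : Int) : String :=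
  PySem.List.pyGetD (PySem.List.pyGetD board y []) x ""

-- ===== PORT A =====
-- inner 'for x in range(...)' with break on a found '+'
def pvScanX (board : List (List String)) (y : Int) : List Int → Bool
  | [] => false
  | x :: xs =>
    if -1 < x ∧ x < 10 ∧ -1 < y ∧ y < 10 then
      (if pvCell board y x = "+" then true else pvScanX board y xs)
    else pvScanX board y xs

-- outer 'for y in range(...)' with the early 'if shipInRange: return not shipInRange'
def pvScanY (board : List (List String)) (xlo xhi : Int) : List Int → Bool
  | [] => false
  | y :: ys =>
    if pvScanX board y (PySem.List.pyRange xlo xhi 1) then true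
    else pvScanY board xlo xhi ys

def ssNoShipClose (board : List (List String)) (org : List Int) (lenght : Int) (rotation : String) : Option Bool :=
  if rotation = "h" then
    some (!pvScanY board (PySem.List.pyGetD org 1 0 - 1) (PySem.List.pyGetD org 1 0 + lenght + 1)
      (PySem.List.pyRange (PySem.List.pyGetD org 0 0 - 1) (PySem.List.pyGetD org 0 0 + 2) 1))
  else if rotation = "v" then
    some (!pvScanY board (PySem.List.pyGetD org 1 0 - 1) (PySem.List.pyGetD org 1 0 + 2)
      (PySem.List.pyRange (PySem.List.pyGetD org 0 0 - 1) (PySem.List.pyGetD org 0 0 + lenght + 1) 1))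
  else none

-- ===== PORT B =====
def pvOffsets : List (Int × Int) :=
  [(-1, -1), (-1, 0), (-1, 1), (0, -1), (0, 0), (0, 1), (1, -1), (1, 0), (1, 1)]

-- Source B's 'plus(y, x)': bounds checked against min(10, actual length) before indexing, so the
-- getD/toNat accesses are exact transcriptions of the guarded board[y][x]
def pvPlus (board : List (List String)) (y x : Int) : Bool :=
  decide (0 ≤ y ∧ y < min 10 (board.length : Int)) &&
  decide (0 ≤ x ∧ x < min 10 (((board.getD y.toNat []).length : Int))) &&
  decide ((board.getD y.toNat []).getD x.toNat "" = "+")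

-- 'any(plus(y+dy, x+dx) for (dy,dx) in offsets)' for one ship cell c
def pvClose (board : List (List String)) (c : Int × Int) : Bool :=
  pvOffsets.any (fun o => pvPlus board (c.1 + o.1) (c.2 + o.2))

def ssNoShipClose_alt (board : List (List String)) (org : List Int) (lenght : Int) (rotation : String) : Option Bool :=
  if rotation = "h" then
    some (!((PySem.List.pyRange 0 lenght 1).map
        (fun i => (PySem.List.pyGetD org 0 0, PySem.List.pyGetD org 1 0 + i))).any (pvClose board))
  else if rotation = "v" then
    some (!((PySem.List.pyRange 0 lenght 1).map
        (fun i => (PySem.List.pyGetD org 0 0 + i, PySem.List.pyGetD org 1 0))).any (pvClose board))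
  else none

-- ===== PRECONDITION & SPEC =====
-- a '+' at an existing cell of row y inside the guarded x-interval (A breaks there before raising)
def pvRowHit (board : List (List String)) (y : Nat) (xlo xhi : Int) : Bool :=
  (List.range 10).any fun x => decide (xlo ≤ (x : Int) ∧ (x : Int) < xhi ∧
    x < (board.getD y []).length ∧ (board.getD y []).getD x "" = "+")

-- row y's scan reaches a guarded index past the row's end with no '+' at an earlier existing cell
def pvRowRaises (board : List (List String)) (y : Nat) (xlo xhi : Int) : Bool :=
  ((List.range 10).any fun x =>
    decide (xlo ≤ (x : Int) ∧ (x : Int) < xhi ∧ (board.getD y []).length ≤ x)) &&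
  !pvRowHit board y xlo xhi

-- some band row raises before any earlier band row found a '+' (A's early return)
def pvRaisesBand (board : List (List String)) (ylo yhi xlo xhi : Int) : Bool :=
  (List.range 10).any fun y =>
    decide (ylo ≤ (y : Int) ∧ (y : Int) < yhi) && pvRowRaises board y xlo xhi &&
    (List.range 10).all fun y' =>
      !(decide (ylo ≤ (y' : Int) ∧ (y' : Int) < yhi ∧ y' < y) && pvRowHit board y' xlo xhi)

-- Pre_ excludes EXACTLY the inputs on which Python A raises IndexError: org too short for the
-- indexing A performs, or A's band scan reaches a missing in-bounds cell before finding a '+'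
-- (for rotation "v" with a one-element org and lenght ≤ -2 the outer range is empty and A
-- returns without touching org[1], so that case stays inside Pre_).
def Pre_ssNoShipClose (board : List (List String)) (org : List Int) (lenght : Int) (rotation : String) : Prop :=
  (rotation = "h" → 2 ≤ org.length ∧
    pvRaisesBand board (org.getD 0 0 - 1) (org.getD 0 0 + 2)
      (org.getD 1 0 - 1) (org.getD 1 0 + lenght + 1) = false) ∧
  (rotation = "v" →
    (2 ≤ org.length ∧
      pvRaisesBand board (org.getD 0 0 - 1) (org.getD 0 0 + lenght + 1)
        (org.getD 1 0 - 1) (org.getD 1 0 + 2) = false) ∨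
    (org.length = 1 ∧ lenght ≤ -2))
instance (board : List (List String)) (org : List Int) (lenght : Int) (rotation : String) : Decidable (Pre_ssNoShipClose board org lenght rotation) := by
  unfold Pre_ssNoShipClose; infer_instance

def pvWitness_ssNoShipClose : List (List String) × List Int × Int × String :=
  ([["~"]], [20, 20], 1, "h")

-- On degenerate lenght ≤ 0 (the ship occupies no cell) with a valid rotation and a '+' in A's
-- residual band around the origin, A returns False while B returns True: an empty ship borders
-- nothing, so B's value is the intended one.
def D_ssNoShipClose (board : List (List String)) (org : List Int) (lenght : Int) (rotation : String) : Prop :=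
  lenght ≤ 0 ∧ 2 ≤ org.length ∧ (rotation = "h" ∨ rotation = "v") ∧
  ∃ y ∈ List.range 10, ∃ x ∈ List.range 10,
    let dy := (y : Int) - org.getD 0 0
    let dx := (x : Int) - org.getD 1 0
    (board.getD y []).getD x "" = "+" ∧ -1 ≤ dy ∧ -1 ≤ dx ∧
    (if rotation = "h" then dy ≤ 1 ∧ dx ≤ lenght else dy ≤ lenght ∧ dx ≤ 1)
instance (board : List (List String)) (org : List Int) (lenght : Int) (rotation : String) : Decidable (D_ssNoShipClose board org lenght rotation) := by unfold D_ssNoShipClose; infer_instance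

def Spec_ssNoShipClose (board : List (List String)) (org : List Int) (lenght : Int) (rotation : String) (out : Option Bool) : Prop := ¬ D_ssNoShipClose board org lenght rotation → out = ssNoShipClose_alt board org lenght rotation
instance (board : List (List String)) (org : List Int) (lenght : Int) (rotation : String) (out : Option Bool) : Decidable (Spec_ssNoShipClose board org lenght rotation out) := by unfold Spec_ssNoShipClose; infer_instance

def pvDiffWitness_ssNoShipClose : List (List String) × List Int × Int × String :=
  ([["+", "~"], ["~", "~"]], [0, 1], 0, "h")
def pvDiffWitnessOut_ssNoShipClose : (Option Bool) × (Option Bool) := (some false, some true)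

-- ===== CLAIM (what is proved, stated in full; the proofs are below) =====
def Claim_unchanged_ssNoShipClose : Prop := ∀ (board : List (List String)) (org : List Int) (lenght : Int) (rotation : String), Dom_ssNoShipClose board org lenght rotation → Pre_ssNoShipClose board org lenght rotation → Spec_ssNoShipClose board org lenght rotation (ssNoShipClose board org lenght rotation)
def Claim_changed_ssNoShipClose : Prop := Dom_ssNoShipClose (pvDiffWitness_ssNoShipClose.1) (pvDiffWitness_ssNoShipClose.2.1) (pvDiffWitness_ssNoShipClose.2.2.1) (pvDiffWitness_ssNoShipClose.2.2.2) ∧ Pre_ssNoShipClose (pvDiffWitness_ssNoShipClose.1) (pvDiffWitness_ssNoShipClose.2.1) (pvDiffWitness_ssNoShipClose.2.2.1) (pvDiffWitness_ssNoShipClose.2.2.2) ∧ D_ssNoShipClose (pvDiffWitness_ssNoShipClose.1) (pvDiffWitness_ssNoShipClose.2.1) (pvDiffWitness_ssNoShipClose.2.2.1) (pvDiffWitness_ssNoShipClose.2.2.2) ∧ ssNoShipClose (pvDiffWitness_ssNoShipClose.1) (pvDiffWitness_ssNoShipClose.2.1) (pvDiffWitness_ssNoShipClose.2.2.1) (pvDiffWitness_ssNoShipClose.2.2.2)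 = pvDiffWitnessOut_ssNoShipClose.1 ∧ ssNoShipClose_alt (pvDiffWitness_ssNoShipClose.1) (pvDiffWitness_ssNoShipClose.2.1) (pvDiffWitness_ssNoShipClose.2.2.1) (pvDiffWitness_ssNoShipClose.2.2.2) = pvDiffWitnessOut_ssNoShipClose.2 ∧ pvDiffWitnessOut_ssNoShipClose.1 ≠ pvDiffWitnessOut_ssNoShipClose.2
def Claim_exact_ssNoShipClose : Prop := ∀ (board : List (List String)) (org : List Int) (lenght : Int) (rotation : String), Dom_ssNoShipClose board org lenght rotation → Pre_ssNoShipClose board org lenght rotation → D_ssNoShipClose board org lenght rotation → ssNoShipClose board org lenght rotation ≠ ssNoShipClose_alt board org lenght rotation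

-- ===== LEMMAS AND PROOFS =====

-- the Int-level description both scans are reduced to
def pvHitIn (board : List (List String)) (ylo yhi xlo xhi : Int) : Prop :=
  ∃ y x : Int, ylo ≤ y ∧ y < yhi ∧ xlo ≤ x ∧ x < xhi ∧
    0 ≤ y ∧ y < 10 ∧ 0 ≤ x ∧ x < 10 ∧ pvCell board y x = "+"

theorem pvGetD0 (org : List Int) : org.getD 0 0 = PySem.List.pyGetD org 0 0 :=
  (PySem.List.pyGetD_zero org 0).symm

theorem pvGetD1 (org : List Int) : org.getD 1 0 = PySem.List.pyGetD org 1 0 := by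
  rw [show (1 : Int) = ((1 : Nat) : Int) from rfl, PySem.List.pyGetD_natCast]

theorem pvCell_natCast (board : List (List String)) (y x : Nat) :
    pvCell board (y : Int) (x : Int) = (board.getD y []).getD x "" := by
  simp [pvCell, PySem.List.pyGetD_natCast]

theorem pvPlus_iff (board : List (List String)) (y x : Int) :
    pvPlus board y x = true ↔
      (-1 < y ∧ y < 10 ∧ -1 < x ∧ x < 10 ∧ pvCell board y x = "+") := by
  unfold pvPlus
  simp only [Bool.and_eq_true, decide_eq_true_eq]
  constructor
  · rintro ⟨⟨⟨hy0, hy⟩, hx0, hx⟩, hc⟩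
    refine ⟨by omega, by omega, by omega, by omega, ?_⟩
    rw [show y = (y.toNat : Int) from (Int.toNat_of_nonneg hy0).symm,
        show x = (x.toNat : Int) from (Int.toNat_of_nonneg hx0).symm, pvCell_natCast]
    exact hc
  · rintro ⟨hy0, hy, hx0, hx, hc⟩
    rw [show y = (y.toNat : Int) from (Int.toNat_of_nonneg (by omega)).symm,
        show x = (x.toNat : Int) from (Int.toNat_of_nonneg (by omega)).symm, pvCell_natCast] at hc
    have hyl : y.toNat < board.length := by
      by_contra hge
      rw [show board.getD y.toNat [] = [] from List.getD_eq_default _ _ (by omega)] at hc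
      simp at hc
    have hxl : x.toNat < (board.getD y.toNat []).length := by
      by_contra hge
      rw [show (board.getD y.toNat []).getD x.toNat "" = "" from
        List.getD_eq_default _ _ (by omega)] at hc
      exact absurd hc (by decide)
    exact ⟨⟨⟨by omega, by omega⟩, by omega, by omega⟩, hc⟩

theorem pvScanX_eq_any (board : List (List String)) (y : Int) (xs : List Int) :
    pvScanX board y xs = xs.any (fun x =>
      decide (-1 < x ∧ x < 10 ∧ -1 < y ∧ y < 10) && decide (pvCell board y x = "+")) := by
  induction xs with
  | nil => rfl
  | cons x xs ih =>
    simp only [pvScanX, List.any_cons]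
    split_ifs <;> simp_all

theorem pvScanY_eq_any (board : List (List String)) (xlo xhi : Int) (ys : List Int) :
    pvScanY board xlo xhi ys = ys.any (fun y => pvScanX board y (PySem.List.pyRange xlo xhi 1)) := by
  induction ys with
  | nil => rfl
  | cons y ys ih =>
    simp only [pvScanY, List.any_cons]
    split_ifs with h <;> simp [h, ih]

theorem pvBandAny_iff (board : List (List String)) (ylo yhi xlo xhi : Int) :
    pvScanY board xlo xhi (PySem.List.pyRange ylo yhi 1) = true ↔ pvHitIn board ylo yhi xlo xhi := by
  rw [pvScanY_eq_any]
  simp only [List.any_eq_true, pvScanX_eq_any, PySem.List.mem_pyRange_one, Bool.and_eq_true,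
    decide_eq_true_eq, pvHitIn]
  constructor
  · rintro ⟨y, ⟨hy1, hy2⟩, x, ⟨hx1, hx2⟩, ⟨hb1, hb2, hb3, hb4⟩, hc⟩
    exact ⟨y, x, hy1, hy2, hx1, hx2, by omega, by omega, by omega, by omega, hc⟩
  · rintro ⟨y, x, hy1, hy2, hx1, hx2, h1, h2, h3, h4, hc⟩
    exact ⟨y, ⟨hy1, hy2⟩, x, ⟨hx1, hx2⟩, ⟨by omega, by omega, by omega, by omega⟩, hc⟩

theorem pvD_iff_h (board : List (List String)) (org : List Int) (L : Int) :
    D_ssNoShipClose board org L "h" ↔ L ≤ 0 ∧ 2 ≤ org.length ∧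
      pvHitIn board (PySem.List.pyGetD org 0 0 - 1) (PySem.List.pyGetD org 0 0 + 2)
        (PySem.List.pyGetD org 1 0 - 1) (PySem.List.pyGetD org 1 0 + L + 1) := by
  simp only [D_ssNoShipClose, String.reduceEq, reduceIte, pvHitIn, List.mem_range,
    ← pvGetD0, ← pvGetD1]
  constructor
  · rintro ⟨hL, hlen, -, y, hy, x, hx, hc, h1, h2, h3, h4⟩
    refine ⟨hL, hlen, y, x, by omega, by omega, by omega, by omega, by omega, by omega, by omega,
      by omega, ?_⟩
    rw [pvCell_natCast]; exact hc
  · rintro ⟨hL, hlen, y, x, h1, h2, h3, h4, hy0, hy10, hx0, hx10, hc⟩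
    refine ⟨hL, hlen, by trivial, y.toNat, by omega, x.toNat, by omega, ?_, by omega, by omega,
      by omega, by omega⟩
    have h := pvCell_natCast board y.toNat x.toNat
    rw [Int.toNat_of_nonneg hy0, Int.toNat_of_nonneg hx0] at h
    rw [← h]; exact hc

theorem pvD_iff_v (board : List (List String)) (org : List Int) (L : Int) :
    D_ssNoShipClose board org L "v" ↔ L ≤ 0 ∧ 2 ≤ org.length ∧
      pvHitIn board (PySem.List.pyGetD org 0 0 - 1) (PySem.List.pyGetD org 0 0 + L + 1)
        (PySem.List.pyGetD org 1 0 - 1) (PySem.List.pyGetD org 1 0 + 2) := by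
  simp only [D_ssNoShipClose, String.reduceEq, reduceIte, pvHitIn, List.mem_range,
    ← pvGetD0, ← pvGetD1]
  constructor
  · rintro ⟨hL, hlen, -, y, hy, x, hx, hc, h1, h2, h3, h4⟩
    refine ⟨hL, hlen, y, x, by omega, by omega, by omega, by omega, by omega, by omega, by omega,
      by omega, ?_⟩
    rw [pvCell_natCast]; exact hc
  · rintro ⟨hL, hlen, y, x, h1, h2, h3, h4, hy0, hy10, hx0, hx10, hc⟩
    refine ⟨hL, hlen, by trivial, y.toNat, by omega, x.toNat, by omega, ?_, by omega, by omega,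
      by omega, by omega⟩
    have h := pvCell_natCast board y.toNat x.toNat
    rw [Int.toNat_of_nonneg hy0, Int.toNat_of_nonneg hx0] at h
    rw [← h]; exact hc

theorem pvCellsAny_h (board : List (List String)) (o0 o1 L : Int) (hL : 1 ≤ L) :
    ((PySem.List.pyRange 0 L 1).map (fun i => (o0, o1 + i))).any (pvClose board) = true ↔
    pvHitIn board (o0 - 1) (o0 + 2) (o1 - 1) (o1 + L + 1) := by
  simp only [List.any_map, Function.comp, pvClose, List.any_eq_true, PySem.List.mem_pyRange_one,
    pvPlus_iff, pvHitIn]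
  constructor
  · rintro ⟨i, ⟨h0, hiL⟩, o, ho, hb1, hb2, hb3, hb4, hc⟩
    fin_cases ho <;> exact ⟨_, _, by omega, by omega, by omega, by omega,
      by omega, by omega, by omega, by omega, hc⟩
  · rintro ⟨y, x, hy1, hy2, hx1, hx2, hy0, hy10, hx0, hx10, hc⟩
    obtain ⟨i, h0i, hiL, hdx⟩ : ∃ i : Int, 0 ≤ i ∧ i < L ∧
        (x - o1 - i = -1 ∨ x - o1 - i = 0 ∨ x - o1 - i = 1) := by
      refine ⟨if x - o1 < 0 then 0 else if L ≤ x - o1 then L - 1 else x - o1, ?_, ?_, ?_⟩ <;>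
        split_ifs <;> omega
    have hdy : y - o0 = -1 ∨ y - o0 = 0 ∨ y - o0 = 1 := by omega
    have hmem : ((y - o0, x - o1 - i) : Int × Int) ∈ pvOffsets := by
      rcases hdy with h | h | h <;> rcases hdx with h' | h' | h' <;> rw [h, h'] <;> decide
    refine ⟨i, ⟨h0i, hiL⟩, (y - o0, x - o1 - i), hmem, by omega, by omega, by omega, by omega, ?_⟩
    rw [show o0 + (y - o0) = y by ring, show o1 + i + (x - o1 - i) = x by ring]
    exact hc

theorem pvCellsAny_v (board : List (List String)) (o0 o1 L : Int) (hL : 1 ≤ L) :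
    ((PySem.List.pyRange 0 L 1).map (fun i => (o0 + i, o1))).any (pvClose board) = true ↔
    pvHitIn board (o0 - 1) (o0 + L + 1) (o1 - 1) (o1 + 2) := by
  simp only [List.any_map, Function.comp, pvClose, List.any_eq_true, PySem.List.mem_pyRange_one,
    pvPlus_iff, pvHitIn]
  constructor
  · rintro ⟨i, ⟨h0, hiL⟩, o, ho, hb1, hb2, hb3, hb4, hc⟩
    fin_cases ho <;> exact ⟨_, _, by omega, by omega, by omega, by omega,
      by omega, by omega, by omega, by omega, hc⟩
  · rintro ⟨y, x, hy1, hy2, hx1, hx2, hy0, hy10, hx0, hx10, hc⟩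
    obtain ⟨i, h0i, hiL, hdy⟩ : ∃ i : Int, 0 ≤ i ∧ i < L ∧
        (y - o0 - i = -1 ∨ y - o0 - i = 0 ∨ y - o0 - i = 1) := by
      refine ⟨if y - o0 < 0 then 0 else if L ≤ y - o0 then L - 1 else y - o0, ?_, ?_, ?_⟩ <;>
        split_ifs <;> omega
    have hdx : x - o1 = -1 ∨ x - o1 = 0 ∨ x - o1 = 1 := by omega
    have hmem : ((y - o0 - i, x - o1) : Int × Int) ∈ pvOffsets := by
      rcases hdy with h | h | h <;> rcases hdx with h' | h' | h' <;> rw [h, h'] <;> decide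
    refine ⟨i, ⟨h0i, hiL⟩, (y - o0 - i, x - o1), hmem, by omega, by omega, by omega, by omega, ?_⟩
    rw [show o0 + i + (y - o0 - i) = y by ring, show o1 + (x - o1) = x by ring]
    exact hc

theorem pvScanY_eq_false (board : List (List String)) (ylo yhi xlo xhi : Int)
    (h : ¬ pvHitIn board ylo yhi xlo xhi) :
    pvScanY board xlo xhi (PySem.List.pyRange ylo yhi 1) = false := by
  rw [Bool.eq_false_iff]
  intro hT
  exact h ((pvBandAny_iff board ylo yhi xlo xhi).mp hT)

-- ===== VERDICT (by name: the statement is the Claim_ definition above) =====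
theorem ssNoShipClose_spec : Claim_unchanged_ssNoShipClose := by
  intro board org lenght rotation _ hpre hnd
  by_cases hr : rotation = "h"
  · subst hr
    have hlen : 2 ≤ org.length := (hpre.1 rfl).1
    simp only [ssNoShipClose, ssNoShipClose_alt, String.reduceEq, reduceIte]
    refine congrArg some (congrArg Bool.not ?_)
    rcases le_or_gt lenght 0 with hL | hL
    · have hnb : ¬ pvHitIn board (PySem.List.pyGetD org 0 0 - 1) (PySem.List.pyGetD org 0 0 + 2)
          (PySem.List.pyGetD org 1 0 - 1) (PySem.List.pyGetD org 1 0 + lenght + 1) :=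
        fun hb => hnd ((pvD_iff_h board org lenght).mpr ⟨hL, hlen, hb⟩)
      rw [pvScanY_eq_false _ _ _ _ _ hnb,
        show PySem.List.pyRange 0 lenght 1 = [] from PySem.List.pyRange_one_eq_nil hL]
      rfl
    · rw [Bool.eq_iff_iff, pvBandAny_iff, pvCellsAny_h _ _ _ _ (by omega)]
  · by_cases hv : rotation = "v"
    · subst hv
      simp only [ssNoShipClose, ssNoShipClose_alt, String.reduceEq, reduceIte]
      refine congrArg some (congrArg Bool.not ?_)
      rcases le_or_gt lenght 0 with hL | hL
      · rcases hpre.2 rfl with ⟨hlen, -⟩ | ⟨hlen, hL2⟩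
        · have hnb : ¬ pvHitIn board (PySem.List.pyGetD org 0 0 - 1)
              (PySem.List.pyGetD org 0 0 + lenght + 1)
              (PySem.List.pyGetD org 1 0 - 1) (PySem.List.pyGetD org 1 0 + 2) :=
            fun hb => hnd ((pvD_iff_v board org lenght).mpr ⟨hL, hlen, hb⟩)
          rw [pvScanY_eq_false _ _ _ _ _ hnb,
            show PySem.List.pyRange 0 lenght 1 = [] from PySem.List.pyRange_one_eq_nil hL]
          rfl
        · -- one-element org and lenght ≤ -2: A's outer range is empty, B's cell list is empty
          rw [show PySem.List.pyRange (PySem.List.pyGetD org 0 0 - 1)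
                (PySem.List.pyGetD org 0 0 + lenght + 1) 1 = [] from
              PySem.List.pyRange_one_eq_nil (by omega),
            show PySem.List.pyRange 0 lenght 1 = [] from PySem.List.pyRange_one_eq_nil hL]
          rfl
      · rw [Bool.eq_iff_iff, pvBandAny_iff, pvCellsAny_v _ _ _ _ (by omega)]
    · simp [ssNoShipClose, ssNoShipClose_alt, hr, hv]

theorem ssNoShipClose_changed : Claim_changed_ssNoShipClose := by
  unfold Claim_changed_ssNoShipClose; decide

theorem ssNoShipClose_tight : Claim_exact_ssNoShipClose := by
  intro board org lenght rotation _ _ hd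
  have hrot := hd.2.2.1
  rcases hrot with hr | hr <;> subst hr
  · obtain ⟨hL, hlen, hb⟩ := (pvD_iff_h board org lenght).mp hd
    have hA : pvScanY board (PySem.List.pyGetD org 1 0 - 1) (PySem.List.pyGetD org 1 0 + lenght + 1)
        (PySem.List.pyRange (PySem.List.pyGetD org 0 0 - 1) (PySem.List.pyGetD org 0 0 + 2) 1) = true :=
      (pvBandAny_iff _ _ _ _ _).mpr hb
    have hB : PySem.List.pyRange 0 lenght 1 = [] := PySem.List.pyRange_one_eq_nil hL
    simp [ssNoShipClose, ssNoShipClose_alt, hA, hB]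
  · obtain ⟨hL, hlen, hb⟩ := (pvD_iff_v board org lenght).mp hd
    have hA : pvScanY board (PySem.List.pyGetD org 1 0 - 1) (PySem.List.pyGetD org 1 0 + 2)
        (PySem.List.pyRange (PySem.List.pyGetD org 0 0 - 1)
          (PySem.List.pyGetD org 0 0 + lenght + 1) 1) = true :=
      (pvBandAny_iff _ _ _ _ _).mpr hb
    have hB : PySem.List.pyRange 0 lenght 1 = [] := PySem.List.pyRange_one_eq_nil hL
    simp [ssNoShipClose, ssNoShipClose_alt, hA, hB]
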